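-- pv_equiv track=rewrite | github.com/saxster/DJANGO5-master | apps/onboarding_api/services/site_coverage.py | _get_required_roles
-- ===== SOURCE A (Python) =====
-- from typing import Dict, Any, List, Optional
--
-- def _get_required_roles(posts: List[Dict]) -> List[str]:
--     """Determine required guard roles/skills."""
--     roles = set(['Security Guard'])
--
--     for post in posts:
--         if post['zone_type'] in ['vault', 'cash_counter']:
--             roles.add('Cash Handling Certified')
--         if post['zone_type'] == 'control_room':
--             roles.add('CCTV Monitoring Trained')
--         if post['zone_type'] == 'gate':
--             roles.add('Access Control Operator')
--
--     return list(roles)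
-- ===== SOURCE B (Python) =====
-- def _get_required_roles(posts):
--     """Determine required guard roles/skills."""
--     role_by_zone = {
--         'vault': 'Cash Handling Certified',
--         'cash_counter': 'Cash Handling Certified',
--         'control_room': 'CCTV Monitoring Trained',
--         'gate': 'Access Control Operator',
--     }
--     roles = {'Security Guard'}
--     for zone in dict.fromkeys(post['zone_type'] for post in posts):
--         role = role_by_zone.get(zone)
--         if role is not None:
--             roles.add(role)
--     return list(roles)
-- ===== Notes on version B (the rewrite author's own statement) =====
-- stated objective: simpler
-- what changed: Replaces the per-post cascade of membership/equality branches by a zone->role lookup table applied once per distinct zone type (dict.fromkeys dedup), so duplicate posts are not re-branched.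
import Mathlib
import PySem

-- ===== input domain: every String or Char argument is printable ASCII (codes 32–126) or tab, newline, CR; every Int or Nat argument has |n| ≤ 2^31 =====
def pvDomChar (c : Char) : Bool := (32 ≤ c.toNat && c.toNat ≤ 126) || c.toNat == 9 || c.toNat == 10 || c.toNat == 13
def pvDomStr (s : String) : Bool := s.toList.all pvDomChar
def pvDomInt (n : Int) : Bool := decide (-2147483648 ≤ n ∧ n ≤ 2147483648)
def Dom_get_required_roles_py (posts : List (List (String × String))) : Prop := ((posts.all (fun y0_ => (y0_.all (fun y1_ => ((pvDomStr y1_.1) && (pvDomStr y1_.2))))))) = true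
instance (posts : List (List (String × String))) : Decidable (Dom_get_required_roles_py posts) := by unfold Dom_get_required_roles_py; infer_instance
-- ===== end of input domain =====

-- B replaces A's per-post branch cascade by a zone→role table consulted once per DISTINCT zone type
-- (objective: simpler). Equality is proved on the PySem set model (first-insertion order): Python's
-- list(set) iteration order carries no information beyond the set's contents.

-- post['zone_type'] : first-match lookup in the assoc list; Pre_ excludes the KeyError case (no such
-- key), so the total default "" (which triggers no branch and maps to no role) is exact on Pre_.
def pvZoneType (post : List (String × String)) : String :=
  ((post.find? (fun p => p.1 == "zone_type")).map Prod.snd).getD ""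

-- ===== PORT A =====
def get_required_roles_py (posts : List (List (String × String))) : List String :=
  posts.foldl (fun roles post =>
    let zt := pvZoneType post
    let roles := if zt = "vault" ∨ zt = "cash_counter" then PySem.Set.add roles "Cash Handling Certified" else roles
    let roles := if zt = "control_room" then PySem.Set.add roles "CCTV Monitoring Trained" else roles
    if zt = "gate" then PySem.Set.add roles "Access Control Operator" else roles)
    (PySem.Set.ofList ["Security Guard"])

-- ===== PORT B =====
def pvRoleByZone : List (String × String) :=
  [("vault", "Cash Handling Certified"), ("cash_counter", "Cash Handling Certified"),
   ("control_room", "CCTV Monitoring Trained"), ("gate", "Access Control Operator")]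

-- role_by_zone.get(zone): keys are distinct literals, so first-match lookup is exact
def pvLookupRole (zone : String) : Option String :=
  (pvRoleByZone.find? (fun p => p.1 == zone)).map Prod.snd

-- dict.fromkeys over the zone types = first occurrences in order = PySem.Set.ofList of the mapped list
def get_required_roles_py_alt (posts : List (List (String × String))) : List String :=
  let zones : PySem.Set String := PySem.Set.ofList (posts.map pvZoneType)
  zones.foldl (fun roles zone =>
    match pvLookupRole zone with
    | some role => PySem.Set.add roles role
    | none => roles)
    (PySem.Set.ofList ["Security Guard"])

-- ===== PRECONDITION & SPEC =====
-- Pre_ excludes exactly the inputs on which Python A raises KeyError: a post without the 'zone_type' key.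
def Pre_get_required_roles_py (posts : List (List (String × String))) : Prop :=
  ∀ post ∈ posts, post.any (fun p => p.1 == "zone_type") = true
instance (posts : List (List (String × String))) : Decidable (Pre_get_required_roles_py posts) := by unfold Pre_get_required_roles_py; infer_instance

def pvWitness_get_required_roles_py : (List (List (String × String))) :=
  [[("zone_type", "vault")], [("zone_type", "gate"), ("name", "Main Gate")]]

def Spec_get_required_roles_py (posts : List (List (String × String))) (out : List String) : Prop := out = get_required_roles_py_alt posts
instance (posts : List (List (String × String))) (out : List String) : Decidable (Spec_get_required_roles_py posts out) := by unfold Spec_get_required_roles_py; infer_instance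

-- ===== CLAIM (what is proved, stated in full; the proofs are below) =====
def Claim_equal_get_required_roles_py : Prop := ∀ (posts : List (List (String × String))), Dom_get_required_roles_py posts → Pre_get_required_roles_py posts → Spec_get_required_roles_py posts (get_required_roles_py posts)

-- ===== LEMMAS AND PROOFS =====

-- B's per-zone step, named for the lemmas.
def pvStep (roles : PySem.Set String) (zone : String) : PySem.Set String :=
  match pvLookupRole zone with
  | some role => PySem.Set.add roles role
  | none => roles

-- A's per-post cascade equals B's table step on the post's zone type.
lemma cascade_eq_step (roles : PySem.Set String) (zt : String) :
    (let r := if zt = "vault" ∨ zt = "cash_counter" then PySem.Set.add roles "Cash Handling Certified" else roles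
     let r := if zt = "control_room" then PySem.Set.add r "CCTV Monitoring Trained" else r
     if zt = "gate" then PySem.Set.add r "Access Control Operator" else r)
    = pvStep roles zt := by
  by_cases h1 : zt = "vault"
  · subst h1; simp [pvStep, pvLookupRole, pvRoleByZone]
  by_cases h2 : zt = "cash_counter"
  · subst h2; simp [pvStep, pvLookupRole, pvRoleByZone, List.find?]
  by_cases h3 : zt = "control_room"
  · subst h3; simp [pvStep, pvLookupRole, pvRoleByZone, List.find?]
  by_cases h4 : zt = "gate"
  · subst h4; simp [pvStep, pvLookupRole, pvRoleByZone, List.find?]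
  · have e1 : ("vault" == zt) = false := beq_eq_false_iff_ne.mpr (Ne.symm h1)
    have e2 : ("cash_counter" == zt) = false := beq_eq_false_iff_ne.mpr (Ne.symm h2)
    have e3 : ("control_room" == zt) = false := beq_eq_false_iff_ne.mpr (Ne.symm h3)
    have e4 : ("gate" == zt) = false := beq_eq_false_iff_ne.mpr (Ne.symm h4)
    simp [pvStep, pvLookupRole, pvRoleByZone, List.find?, h1, h2, h3, h4, e1, e2, e3, e4]

-- "the role of this zone (if any) is already in roles"
def pvDone (zone : String) (roles : PySem.Set String) : Prop :=
  match pvLookupRole zone with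
  | some role => role ∈ roles
  | none => True

lemma done_mono (z x : String) (s : PySem.Set String) (h : pvDone z s) : pvDone z (pvStep s x) := by
  unfold pvDone pvStep at *
  cases hz : pvLookupRole z with
  | none => trivial
  | some rz =>
    rw [hz] at h
    cases hx : pvLookupRole x with
    | none => exact h
    | some rx => exact (PySem.Set.mem_add _ _ _).mpr (Or.inl h)

lemma done_self (z : String) (s : PySem.Set String) : pvDone z (pvStep s z) := by
  unfold pvDone pvStep
  cases hz : pvLookupRole z with
  | none => trivial
  | some rz => exact (PySem.Set.mem_add _ _ _).mpr (Or.inr rfl)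

lemma done_mono_fold (z : String) (xs : List String) (s : PySem.Set String) (h : pvDone z s) :
    pvDone z (xs.foldl pvStep s) := by
  induction xs generalizing s with
  | nil => exact h
  | cons x xs ih => exact ih _ (done_mono z x s h)

lemma done_fold_of_mem (z : String) (xs : List String) (s : PySem.Set String) (h : z ∈ xs) :
    pvDone z (xs.foldl pvStep s) := by
  induction xs generalizing s with
  | nil => cases h
  | cons x xs ih =>
    rcases List.mem_cons.mp h with rfl | hz
    · exact done_mono_fold z xs _ (done_self z s)
    · exact ih _ hz

lemma step_of_done (z : String) (s : PySem.Set String) (h : pvDone z s) : pvStep s z = s := by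
  unfold pvDone pvStep at *
  cases hz : pvLookupRole z with
  | none => rfl
  | some rz =>
    rw [hz] at h
    exact PySem.Set.add_of_mem h

-- folding pvStep over a list equals folding it over the list's set of distinct elements
lemma fold_ofList (xs : List String) (s : PySem.Set String) :
    xs.foldl pvStep s = (PySem.Set.ofList xs).foldl pvStep s := by
  induction xs using List.reverseRecOn with
  | nil => rfl
  | append_singleton xs x ih =>
    rw [List.foldl_append, PySem.Set.ofList_append_singleton, ih]
    by_cases hx : x ∈ PySem.Set.ofList xs
    · rw [PySem.Set.add_of_mem hx, List.foldl_cons, List.foldl_nil, step_of_done]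
      exact done_fold_of_mem x _ s hx
    · rw [PySem.Set.add_of_not_mem hx, List.foldl_append, List.foldl_cons, List.foldl_nil]

-- ===== VERDICT (by name: the statement is the Claim_ definition above) =====
theorem get_required_roles_py_spec : Claim_equal_get_required_roles_py := by
  intro posts _ _
  unfold Spec_get_required_roles_py get_required_roles_py get_required_roles_py_alt
  have hA : (fun (roles : PySem.Set String) (post : List (String × String)) =>
      let zt := pvZoneType post
      let roles := if zt = "vault" ∨ zt = "cash_counter" then PySem.Set.add roles "Cash Handling Certified" else roles
      let roles := if zt = "control_room" then PySem.Set.add roles "CCTV Monitoring Trained" else roles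
      if zt = "gate" then PySem.Set.add roles "Access Control Operator" else roles)
      = (fun roles post => pvStep roles (pvZoneType post)) := by
    funext roles post
    exact cascade_eq_step roles (pvZoneType post)
  show _ = List.foldl _ _ _
  rw [hA, ← List.foldl_map (f := pvZoneType) (g := pvStep), fold_ofList]
  rfl
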